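-- pv_equiv track=rewrite | github.com/tdayu/tf-pwa | tf_pwa/particle.py | split_len
-- ===== SOURCE A (Python) =====
-- def split_len(dicts):
--     """
--     Split a dictionary of lists by their length.
--     E.g. {"b":[2],"c":[1,3],"d":[1]} => [None, [('b', [2]), ('d', [1])], [('c', [1, 3])]]
--
--     Put to utils.py or _split_len if not used anymore???
--
--     :param dicts: Dictionary
--     :return: List of dictionary
--     """
--     size_table = []
--     for i in dicts:
--         tmp = dicts[i]
--         size_table.append((len(tmp), i))
--     max_l = max([i for i, _ in size_table])
--     ret = [None] * (max_l + 1)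
--     for i, s in size_table:
--         if ret[i] is None:
--             ret[i] = []
--         ret[i].append((s, dicts[s]))
--     return ret
-- ===== SOURCE B (Python) =====
-- def split_len(dicts):
--     max_l = max(len(v) for v in dicts.values())
--     return [[(k, v) for k, v in dicts.items() if len(v) == n] or None
--             for n in range(max_l + 1)]
-- ===== Notes on version B (the rewrite author's own statement) =====
-- stated objective: simpler
-- what changed: Replaces A's two-pass build (size_table list, then a None-checked scatter into a preallocated list) by computing the max length and building each bucket directly with a per-length filter comprehension ('or None' for empty buckets).
import Mathlib
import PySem

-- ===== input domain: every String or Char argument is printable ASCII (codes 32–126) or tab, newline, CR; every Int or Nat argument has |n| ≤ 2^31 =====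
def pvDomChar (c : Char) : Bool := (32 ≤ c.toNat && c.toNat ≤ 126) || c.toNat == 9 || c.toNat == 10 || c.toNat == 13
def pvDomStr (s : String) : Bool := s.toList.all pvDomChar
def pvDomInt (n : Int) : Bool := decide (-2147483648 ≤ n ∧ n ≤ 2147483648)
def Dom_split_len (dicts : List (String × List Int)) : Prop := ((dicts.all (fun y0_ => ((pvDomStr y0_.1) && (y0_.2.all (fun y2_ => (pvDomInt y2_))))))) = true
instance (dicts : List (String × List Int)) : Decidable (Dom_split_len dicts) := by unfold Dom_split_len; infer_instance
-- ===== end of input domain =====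

-- B replaces A's size_table + None-checked scatter by a per-length filter comprehension: simpler, same values.

-- ===== PORT A =====
-- for i in dicts: iterate the dict's keys; dicts[i] is a lookup of a present key, so getD [] is exact;
-- ret[i] accesses/sets index i ≤ max_l < ret.length, so List.set / getD are exact (no IndexError reachable).
def split_len (dicts : List (String × List Int)) : List (Option (List (String × List Int))) :=
  let d := PySem.Dict.mk dicts
  let size_table : List (Nat × String) :=
    d.keys.map (fun i => (((d.get? i).getD []).length, i))
  match PySem.List.max? (size_table.map (fun p => p.1)) (fun x => x) with
  | none => []   -- unreachable inside Pre_: Python's max([]) raises ValueError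
  | some max_l =>
    let ret : List (Option (List (String × List Int))) := List.replicate (max_l + 1) none
    size_table.foldl (fun ret p =>
      ret.set p.1 (some (((ret.getD p.1 none).getD []) ++ [(p.2, (d.get? p.2).getD [])]))) ret

-- ===== PORT B =====
def split_len_alt (dicts : List (String × List Int)) : List (Option (List (String × List Int))) :=
  match PySem.List.max? (dicts.map (fun kv => kv.2.length)) (fun x => x) with
  | none => []   -- unreachable inside Pre_: Python's max() of an empty generator raises ValueError
  | some max_l =>
    (List.range (max_l + 1)).map (fun n =>
      let b := dicts.filter (fun kv => kv.2.length == n)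
      if b.isEmpty then none else some b)

-- ===== PRECONDITION & SPEC =====
-- Pre_ excludes the empty dict, on which both Pythons raise ValueError (max of an empty sequence),
-- and association lists with duplicate keys, which do not encode any Python dict (dict keys are unique).
def Pre_split_len (dicts : List (String × List Int)) : Prop :=
  dicts ≠ [] ∧ (dicts.map Prod.fst).Nodup
instance (dicts : List (String × List Int)) : Decidable (Pre_split_len dicts) := by
  unfold Pre_split_len; infer_instance
def pvWitness_split_len : (List (String × List Int)) := [("b", [2]), ("c", [1, 3]), ("d", [1])]
def Spec_split_len (dicts : List (String × List Int)) (out : List (Option (List (String × List Int)))) : Prop := out = split_len_alt dicts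
instance (dicts : List (String × List Int)) (out : List (Option (List (String × List Int)))) : Decidable (Spec_split_len dicts out) := by unfold Spec_split_len; infer_instance

-- ===== CLAIM (what is proved, stated in full; the proofs are below) =====
def Claim_equal_split_len : Prop := ∀ (dicts : List (String × List Int)), Dom_split_len dicts → Pre_split_len dicts → Spec_split_len dicts (split_len dicts)

-- ===== LEMMAS AND PROOFS =====

-- the body of A's second loop, rewritten over the original (key, value) pairs
def pvStep (ret : List (Option (List (String × List Int)))) (kv : String × List Int) :
    List (Option (List (String × List Int))) :=
  ret.set kv.2.length (some (((ret.getD kv.2.length none).getD []) ++ [kv]))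

theorem length_foldl_pvStep (l : List (String × List Int))
    (ret : List (Option (List (String × List Int)))) :
    (l.foldl pvStep ret).length = ret.length := by
  induction l generalizing ret with
  | nil => rfl
  | cons kv t ih => simp [List.foldl_cons, ih, pvStep]

theorem getD_foldl_pvStep (l : List (String × List Int)) :
    ∀ (ret : List (Option (List (String × List Int)))) (n : Nat),
    (∀ kv ∈ l, kv.2.length < ret.length) →
    (l.foldl pvStep ret).getD n none =
      (if (l.filter (fun kv => kv.2.length == n)).isEmpty then ret.getD n none
       else some (((ret.getD n none).getD []) ++ l.filter (fun kv => kv.2.length == n))) := by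
  induction l with
  | nil => intro ret n h; simp
  | cons kv t ih =>
    intro ret n h
    have hkv : kv.2.length < ret.length := h kv (by simp)
    have ht : ∀ p ∈ t, p.2.length < (pvStep ret kv).length := by
      intro p hp
      simpa [pvStep] using h p (by simp [hp])
    rw [List.foldl_cons, ih _ n ht]
    by_cases hL : kv.2.length = n
    · have hset : (pvStep ret kv).getD n none =
          some (((ret.getD n none).getD []) ++ [kv]) := by
        subst hL
        simp [pvStep, List.getD_eq_getElem?_getD, hkv]
      rw [hset]
      by_cases hf : (t.filter (fun p => p.2.length == n)).isEmpty
      · simp [hL, List.isEmpty_iff.mp hf]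
      · simp [hL, hf]
    · have hset : (pvStep ret kv).getD n none = ret.getD n none := by
        simp [pvStep, List.getD_eq_getElem?_getD, List.getElem?_set_ne, hL]
      rw [hset, List.filter_cons_of_neg (by simp [hL])]

-- ===== VERDICT (by name: the statement is the Claim_ definition above) =====
theorem split_len_spec : Claim_equal_split_len := by
  intro dicts _hdom hpre
  obtain ⟨hne, hnd⟩ := hpre
  unfold Spec_split_len split_len split_len_alt
  have hget : ∀ kv ∈ dicts, (PySem.Dict.mk dicts).get? kv.1 = some kv.2 := by
    intro kv hkv
    apply PySem.Dict.get?_of_mem_items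
    · simpa using hkv
    · simpa [PySem.Dict.keys_mk] using hnd
  have hst : ((PySem.Dict.mk dicts).keys.map
        (fun i => ((((PySem.Dict.mk dicts).get? i).getD []).length, i)))
      = dicts.map (fun kv => (kv.2.length, kv.1)) := by
    rw [PySem.Dict.keys_mk, List.map_map]
    refine List.map_congr_left ?_
    intro kv hkv
    simp [hget kv hkv]
  simp only [hst, List.map_map]
  have hfst : dicts.map ((fun p => p.1) ∘ fun kv : String × List Int => (kv.2.length, kv.1))
      = dicts.map (fun kv => kv.2.length) := rfl
  rw [hfst]
  rcases hmax : PySem.List.max? (dicts.map (fun kv => kv.2.length)) (fun x => x) with _ | m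
  · simp only [hmax]
  · simp only [hmax]
    have hbound : ∀ kv ∈ dicts, kv.2.length < m + 1 := by
      intro kv hkv
      have := PySem.List.max?_isMax hmax kv.2.length (List.mem_map_of_mem hkv)
      omega
    have hfold : (dicts.map (fun kv => (kv.2.length, kv.1))).foldl
        (fun ret p => ret.set p.1 (some (((ret.getD p.1 none).getD []) ++
          [(p.2, ((PySem.Dict.mk dicts).get? p.2).getD [])])))
        (List.replicate (m + 1) none)
        = dicts.foldl pvStep (List.replicate (m + 1) none) := by
      rw [List.foldl_map]
      refine PySem.List.foldl_congr_mem' _ _ _ _ ?_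
      intro kv hkv acc
      rw [hget kv hkv]
      rfl
    rw [hfold]
    have hlen : (dicts.foldl pvStep (List.replicate (m + 1) none)).length = m + 1 := by
      rw [length_foldl_pvStep]; simp
    apply List.ext_getElem
    · simp [hlen]
    · intro i h1 h2
      have hL : (dicts.foldl pvStep (List.replicate (m + 1) none))[i] =
          (dicts.foldl pvStep (List.replicate (m + 1) none)).getD i none := by
        rw [List.getD_eq_getElem _ _ h1]
      rw [hL, getD_foldl_pvStep dicts _ i (by simpa using hbound)]
      have hi : (List.range (m + 1))[i]'(by simpa using h2) = i := List.getElem_range _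
      simp only [List.getElem_map, hi]
      simp
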